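-- pv_equiv track=rewrite | github.com/MatiPl01/Wstep-do-Informatyki | Ćwiczenia/6, 7, 8. Zajęcia/Zadanie21/Program1.py | search_subset
-- ===== SOURCE A (Python) =====
-- def search_subset(matrix, searched_sum) -> bool:
--     if searched_sum < 0:
--         return False
--
--     def recur(row_idx=-1, curr_sum=0, remaining_cols=set(range(len(matrix[0])))):
--         if row_idx == len(matrix)-1:
--             # Check if current sum is the one desired and whether we have included any number in the subset
--             return curr_sum == searched_sum and len(remaining_cols) != len(matrix[0])
--
--         results = [recur(row_idx+1, curr_sum, remaining_cols)]
--         for i in remaining_cols: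
--             results.append(recur(row_idx+1, curr_sum + matrix[row_idx][i], remaining_cols.difference({i})))
--
--         return any(results)  # If any is True, return True
--
--     return recur()
-- ===== SOURCE B (Python) =====
-- def search_subset(matrix, searched_sum) -> bool:
--     if searched_sum < 0:
--         return False
--     m = len(matrix[0])
--     # DP over rows: set of reachable (sorted tuple of used columns, partial sum) states
--     states = {((), 0)}
--     for row in matrix:
--         new = set(states)
--         for used, s in states:
--             for i in range(m):
--                 if i not in used:
--                     new.add((tuple(sorted(used + (i,))), s + row[i]))
--         states = new
--     return any(s == searched_sum and used for used, s in states)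
-- ===== Notes on version B (the rewrite author's own statement) =====
-- stated objective: alternative
-- what changed: Replaces the branching recursion over (row index, remaining-column set) with a forward dynamic program that folds over the rows maintaining a deduplicated set of reachable (used-columns, partial-sum) states.
import Mathlib
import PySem

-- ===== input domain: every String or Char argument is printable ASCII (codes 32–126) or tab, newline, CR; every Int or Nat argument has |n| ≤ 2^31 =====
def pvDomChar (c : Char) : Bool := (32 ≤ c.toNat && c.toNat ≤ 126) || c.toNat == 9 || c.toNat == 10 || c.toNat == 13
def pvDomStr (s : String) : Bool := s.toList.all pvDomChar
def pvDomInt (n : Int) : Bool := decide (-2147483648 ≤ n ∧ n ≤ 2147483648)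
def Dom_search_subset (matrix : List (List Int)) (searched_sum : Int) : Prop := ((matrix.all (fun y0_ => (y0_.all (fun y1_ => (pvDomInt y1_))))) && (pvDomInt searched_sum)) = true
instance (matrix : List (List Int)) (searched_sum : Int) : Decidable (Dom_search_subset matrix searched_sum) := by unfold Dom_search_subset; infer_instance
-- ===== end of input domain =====

-- B replaces A's branching recursion over (row index, remaining-column set) by a forward
-- DP over the rows keeping the set of reachable (used-columns, partial-sum) states;
-- equivalence of the RETURN value is proved on Pre_ (inputs where the Python A does not raise).

-- ===== PORT A =====
-- matrix[row_idx][i]: under Pre_search_subset these indexings never raise, so the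
-- IndexError case is defaulted (getD); row_idx may be -1 (Python wraparound via pyGet?).
def pvEntry (r : List Int) (i : Int) : Int := (PySem.List.pyGet? r i).getD 0
def pvRow (matrix : List (List Int)) (k : Int) : List Int := (PySem.List.pyGet? matrix k).getD []
def pvCols (m : Nat) : List Int := List.map (fun n : Nat => (n : Int)) (List.range m)  -- set(range(m))

-- recur of A; fuel only makes the recursion structural (it is never exhausted on A's calls)
def recurA (matrix : List (List Int)) (target : Int) (m : Nat)
    (fuel : Nat) (row_idx curr_sum : Int) (remaining : List Int) : Bool :=
    if row_idx = (matrix.length : Int) - 1 then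
      decide (curr_sum = target) && !(decide (remaining.length = m))
    else
      match fuel with
      | 0 => false
      | fuel + 1 =>
        (recurA matrix target m fuel (row_idx + 1) curr_sum remaining ::
          remaining.map (fun i =>
            recurA matrix target m fuel (row_idx + 1)
              (curr_sum + pvEntry (pvRow matrix row_idx) i)
              (PySem.Set.diff remaining [i]))).any id

def search_subset (matrix : List (List Int)) (searched_sum : Int) : Bool :=
  if searched_sum < 0 then false
  else
    recurA matrix searched_sum (matrix.headD []).length
      matrix.length (-1) 0 (pvCols (matrix.headD []).length)

-- ===== PORT B =====
-- one row of the DP: new = set(states); for (used, s) in states: for i in range(m):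
--   if i not in used: new.add((tuple(sorted(used + (i,))), s + row[i]))
def stepB (m : Nat) (states : List (List Int × Int)) (row : List Int) : List (List Int × Int) :=
  states.foldl (fun acc p =>
    (List.range m).foldl (fun acc2 iN =>
      if p.1.contains (iN : Int) then acc2
      else PySem.Set.add acc2
        (PySem.List.sorted (p.1 ++ [(iN : Int)]) (fun x => x) false, p.2 + pvEntry row (iN : Int)))
      acc) states

def search_subset_alt (matrix : List (List Int)) (searched_sum : Int) : Bool :=
  if searched_sum < 0 then false
  else
    (matrix.foldl (stepB (matrix.headD []).length) [(([] : List Int), (0 : Int))]).any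
      (fun p => decide (p.2 = searched_sum) && !p.1.isEmpty)

-- ===== PRECONDITION & SPEC =====
-- When searched_sum ≥ 0 the Python A evaluates matrix[0] (IndexError on an empty matrix)
-- and row[i] for every row and every i < len(matrix[0]) (IndexError on a row shorter than
-- row 0); Pre_ excludes exactly those raising inputs.
def Pre_search_subset (matrix : List (List Int)) (searched_sum : Int) : Prop :=
  searched_sum < 0 ∨ (matrix ≠ [] ∧ ∀ r ∈ matrix, (matrix.headD []).length ≤ r.length)
instance (matrix : List (List Int)) (searched_sum : Int) : Decidable (Pre_search_subset matrix searched_sum) := by unfold Pre_search_subset; infer_instance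
def pvWitness_search_subset : List (List Int) × Int := ([[1, 2], [3, 4]], 3)

def Spec_search_subset (matrix : List (List Int)) (searched_sum : Int) (out : Bool) : Prop := out = search_subset_alt matrix searched_sum
instance (matrix : List (List Int)) (searched_sum : Int) (out : Bool) : Decidable (Spec_search_subset matrix searched_sum out) := by unfold Spec_search_subset; infer_instance

-- ===== CLAIM (what is proved, stated in full; the proofs are below) =====
def Claim_equal_search_subset : Prop := ∀ (matrix : List (List Int)) (searched_sum : Int), Dom_search_subset matrix searched_sum → Pre_search_subset matrix searched_sum → Spec_search_subset matrix searched_sum (search_subset matrix searched_sum)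

-- ===== LEMMAS AND PROOFS =====

-- A partial assignment picking, for some of the rows, a column i ∈ [0, m) (all distinct),
-- u = the set of picked columns, t = the sum of the picked entries.
inductive Asg (m : Nat) : List (List Int) → Finset Int → Int → Prop
  | nil : Asg m [] ∅ 0
  | skip {r : List Int} {rs : List (List Int)} {u : Finset Int} {t : Int} :
      Asg m rs u t → Asg m (r :: rs) u t
  | pick {r : List Int} {rs : List (List Int)} {u : Finset Int} {t : Int} (i : Int)
      (h0 : 0 ≤ i) (hm : i < (m : Int)) (hni : i ∉ u) :
      Asg m rs u t → Asg m (r :: rs) (insert i u) (pvEntry r i + t)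

lemma Asg_nil_iff (m : Nat) (u : Finset Int) (t : Int) :
    Asg m [] u t ↔ u = ∅ ∧ t = 0 := by
  constructor
  · intro h; cases h; exact ⟨rfl, rfl⟩
  · rintro ⟨rfl, rfl⟩; exact Asg.nil

lemma Asg_cons_iff (m : Nat) (r : List Int) (rs : List (List Int)) (u : Finset Int) (t : Int) :
    Asg m (r :: rs) u t ↔ Asg m rs u t ∨
      ∃ i u' t', 0 ≤ i ∧ i < (m : Int) ∧ i ∉ u' ∧ Asg m rs u' t' ∧
        u = insert i u' ∧ t = pvEntry r i + t' := by
  constructor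
  · intro h
    cases h with
    | skip h => exact Or.inl h
    | pick i h0 hm hni h => exact Or.inr ⟨i, _, _, h0, hm, hni, h, rfl, rfl⟩
  · rintro (h | ⟨i, u', t', h0, hm, hni, h, rfl, rfl⟩)
    · exact Asg.skip h
    · exact Asg.pick i h0 hm hni h

lemma Asg_bounds {m : Nat} {rs : List (List Int)} {u : Finset Int} {t : Int}
    (h : Asg m rs u t) : ∀ i ∈ u, 0 ≤ i ∧ i < (m : Int) := by
  induction h with
  | nil => intro i hi; simp at hi
  | skip _ ih => exact ih
  | pick i h0 hm hni _ ih =>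
    intro j hj
    rcases Finset.mem_insert.mp hj with rfl | hj
    · exact ⟨h0, hm⟩
    · exact ih j hj

lemma Asg_perm {m : Nat} {l₁ l₂ : List (List Int)} (hp : l₁.Perm l₂) :
    ∀ {u : Finset Int} {t : Int}, Asg m l₁ u t → Asg m l₂ u t := by
  induction hp with
  | nil => exact fun h => h
  | cons x _ ih =>
    intro u t h
    rcases (Asg_cons_iff _ _ _ _ _).mp h with h' | ⟨i, u', t', h0, hm, hni, h', rfl, rfl⟩
    · exact Asg.skip (ih h')
    · exact Asg.pick i h0 hm hni (ih h')
  | swap x y l =>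
    intro u t h
    rcases (Asg_cons_iff _ _ _ _ _).mp h with h' | ⟨i, u', t', h0, hm, hni, h', rfl, rfl⟩
    · rcases (Asg_cons_iff _ _ _ _ _).mp h' with h'' | ⟨j, u'', t'', j0, jm, jni, h'', rfl, rfl⟩
      · exact Asg.skip (Asg.skip h'')
      · exact Asg.pick j j0 jm jni (Asg.skip h'')
    · rcases (Asg_cons_iff _ _ _ _ _).mp h' with h'' | ⟨j, u'', t'', j0, jm, jni, h'', rfl, rfl⟩
      · exact Asg.skip (Asg.pick i h0 hm hni h'')
      · have hij : i ≠ j := by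
          intro hij; exact hni (hij ▸ Finset.mem_insert_self j u'')
        have hiu'' : i ∉ u'' := fun hc => hni (Finset.mem_insert_of_mem hc)
        have h₁ : Asg m (y :: l) (insert i u'') (pvEntry y i + t'') :=
          Asg.pick i h0 hm hiu'' h''
        have h₂ : Asg m (x :: y :: l) (insert j (insert i u''))
            (pvEntry x j + (pvEntry y i + t'')) :=
          Asg.pick j j0 jm (by
            intro hc
            rcases Finset.mem_insert.mp hc with rfl | hc
            · exact hij rfl
            · exact jni hc) h₁
        have e1 : insert j (insert i u'') = insert i (insert j u'') := Finset.insert_comm j i u''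
        have e2 : pvEntry x j + (pvEntry y i + t'') = pvEntry y i + (pvEntry x j + t'') := by ring
        rw [e1, e2] at h₂
        exact h₂
  | trans _ _ ih₁ ih₂ => exact fun h => ih₂ (ih₁ h)

-- ---------- B side ----------

def sortF (u : Finset Int) : List Int := u.sort (· ≤ ·)

lemma mem_sortF (i : Int) (u : Finset Int) : i ∈ sortF u ↔ i ∈ u := Finset.mem_sort _

lemma sortF_toFinset (u : Finset Int) : (sortF u).toFinset = u := by
  ext i; simp [List.mem_toFinset, mem_sortF]

lemma sortF_eq_nil (u : Finset Int) : sortF u = [] ↔ u = ∅ := by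
  constructor
  · intro h
    ext a
    simp only [Finset.notMem_empty, iff_false]
    intro ha
    have : a ∈ sortF u := (mem_sortF a u).mpr ha
    rw [h] at this
    simp at this
  · intro h; subst h; simp [sortF]

lemma sorted_sortF_append (w : Finset Int) (i : Int) (h : i ∉ w) :
    PySem.List.sorted (sortF w ++ [i]) (fun x => x) false = sortF (insert i w) := by
  apply PySem.List.sorted_eq_of_perm_of_pairwise_lt
  · have h1 : (sortF (insert i w)).Perm (insert i w).toList := Finset.sort_perm_toList _ _
    have h2 : ((insert i w).toList).Perm (i :: w.toList) := Finset.toList_insert h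
    have h3 : (i :: w.toList).Perm (i :: sortF w) := List.Perm.cons i (Finset.sort_perm_toList _ _).symm
    have h4 : (i :: sortF w).Perm (sortF w ++ [i]) := (List.perm_append_singleton i (sortF w)).symm
    exact ((h1.trans h2).trans h3).trans h4
  · exact (Finset.sortedLT_sort _).pairwise

-- membership in the generic inner / outer folds of stepB
lemma mem_foldl_ite_add {α β : Type} [BEq α] [LawfulBEq α] (C : β → Bool) (f : β → α) :
    ∀ (l : List β) (acc : List α) (x : α),
      x ∈ l.foldl (fun acc2 i => if C i then acc2 else PySem.Set.add acc2 (f i)) acc ↔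
        x ∈ acc ∨ ∃ i ∈ l, C i = false ∧ x = f i := by
  intro l
  induction l with
  | nil => intro acc x; simp
  | cons hd tl ih =>
    intro acc x
    simp only [List.foldl_cons]
    by_cases hC : C hd
    · rw [if_pos hC, ih]
      constructor
      · rintro (hx | ⟨i, hi, hCi, rfl⟩)
        · exact Or.inl hx
        · exact Or.inr ⟨i, List.mem_cons_of_mem _ hi, hCi, rfl⟩
      · rintro (hx | ⟨i, hi, hCi, rfl⟩)
        · exact Or.inl hx
        · rcases List.mem_cons.mp hi with rfl | hi
          · rw [hC] at hCi; cases hCi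
          · exact Or.inr ⟨i, hi, hCi, rfl⟩
    · rw [if_neg hC, ih]
      constructor
      · rintro (hx | ⟨i, hi, hCi, rfl⟩)
        · rcases (PySem.Set.mem_add _ _ _).mp hx with hx | rfl
          · exact Or.inl hx
          · exact Or.inr ⟨hd, List.mem_cons_self, Bool.eq_false_iff.mpr hC, rfl⟩
        · exact Or.inr ⟨i, List.mem_cons_of_mem _ hi, hCi, rfl⟩
      · rintro (hx | ⟨i, hi, hCi, rfl⟩)
        · exact Or.inl ((PySem.Set.mem_add _ _ _).mpr (Or.inl hx))
        · rcases List.mem_cons.mp hi with rfl | hi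
          · exact Or.inl ((PySem.Set.mem_add _ _ _).mpr (Or.inr rfl))
          · exact Or.inr ⟨i, hi, hCi, rfl⟩

lemma mem_foldl_gen {α β : Type} (P : β → α → Prop) (g : List α → β → List α)
    (hg : ∀ acc p x, x ∈ g acc p ↔ x ∈ acc ∨ P p x) :
    ∀ (l : List β) (acc : List α) (x : α),
      x ∈ l.foldl g acc ↔ x ∈ acc ∨ ∃ p ∈ l, P p x := by
  intro l
  induction l with
  | nil => intro acc x; simp
  | cons hd tl ih =>
    intro acc x
    simp only [List.foldl_cons]
    rw [ih, hg]
    constructor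
    · rintro ((hx | hP) | ⟨p, hp, hP⟩)
      · exact Or.inl hx
      · exact Or.inr ⟨hd, List.mem_cons_self, hP⟩
      · exact Or.inr ⟨p, List.mem_cons_of_mem _ hp, hP⟩
    · rintro (hx | ⟨p, hp, hP⟩)
      · exact Or.inl (Or.inl hx)
      · rcases List.mem_cons.mp hp with rfl | hp
        · exact Or.inl (Or.inr hP)
        · exact Or.inr ⟨p, hp, hP⟩

lemma mem_stepB (m : Nat) (S : List (List Int × Int)) (row : List Int) (q : List Int × Int) :
    q ∈ stepB m S row ↔ q ∈ S ∨ ∃ p ∈ S, ∃ i : Int, 0 ≤ i ∧ i < (m : Int) ∧ i ∉ p.1 ∧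
      q = (PySem.List.sorted (p.1 ++ [i]) (fun x => x) false, p.2 + pvEntry row i) := by
  unfold stepB
  rw [mem_foldl_gen
    (P := fun p x => ∃ iN ∈ List.range m, (p.1.contains ((iN : Nat) : Int)) = false ∧
      x = (PySem.List.sorted (p.1 ++ [((iN : Nat) : Int)]) (fun x => x) false,
           p.2 + pvEntry row ((iN : Nat) : Int)))
    (g := _) (fun acc p x => mem_foldl_ite_add _ _ (List.range m) acc x)]
  constructor
  · rintro (hq | ⟨p, hp, iN, hiN, hc, rfl⟩)
    · exact Or.inl hq
    · refine Or.inr ⟨p, hp, (iN : Int), by positivity, ?_, ?_, rfl⟩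
      · exact_mod_cast List.mem_range.mp hiN
      · intro hmem
        simp_all
  · rintro (hq | ⟨p, hp, i, h0, hm, hni, rfl⟩)
    · exact Or.inl hq
    · refine Or.inr ⟨p, hp, i.toNat, List.mem_range.mpr ?_, ?_, ?_⟩
      · omega
      · rw [Int.toNat_of_nonneg h0]
        simpa using hni
      · rw [Int.toNat_of_nonneg h0]

def InvB (S : List (List Int × Int)) : Prop := ∀ p ∈ S, p.1 = sortF p.1.toFinset

lemma toFinset_sorted_append {p1 : List Int} (hp1 : p1 = sortF p1.toFinset) {i : Int}
    (hni : i ∉ p1.toFinset) :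
    (PySem.List.sorted (p1 ++ [i]) (fun x => x) false).toFinset = insert i p1.toFinset ∧
    PySem.List.sorted (p1 ++ [i]) (fun x => x) false = sortF (insert i p1.toFinset) := by
  have h : PySem.List.sorted (p1 ++ [i]) (fun x => x) false = sortF (insert i p1.toFinset) := by
    conv_lhs => rw [hp1]
    exact sorted_sortF_append _ _ hni
  exact ⟨by rw [h, sortF_toFinset], h⟩

lemma InvB_stepB {m : Nat} {S : List (List Int × Int)} {row : List Int} (hS : InvB S) :
    InvB (stepB m S row) := by
  intro q hq
  rcases (mem_stepB m S row q).mp hq with hq | ⟨p, hp, i, h0, hm, hni, rfl⟩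
  · exact hS q hq
  · have hp1 := hS p hp
    have hni' : i ∉ p.1.toFinset := by simpa [List.mem_toFinset] using hni
    obtain ⟨h1, h2⟩ := toFinset_sorted_append hp1 hni'
    show (PySem.List.sorted (p.1 ++ [i]) (fun x => x) false) = _
    rw [h2]
    simp only [sortF_toFinset]

lemma mem_foldl_stepB (m : Nat) (rows : List (List Int)) :
    ∀ (S : List (List Int × Int)), InvB S → ∀ q,
      (q ∈ rows.foldl (stepB m) S ↔ ∃ p ∈ S, ∃ u t, Asg m rows u t ∧
        Disjoint u p.1.toFinset ∧ q = (sortF (p.1.toFinset ∪ u), p.2 + t)) := by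
  induction rows with
  | nil =>
    intro S hS q
    simp only [List.foldl_nil]
    constructor
    · intro hq
      refine ⟨q, hq, ∅, 0, Asg.nil, Finset.disjoint_left.mpr (by simp), ?_⟩
      rw [Finset.union_empty, add_zero, ← hS q hq]
    · rintro ⟨p, hp, u, t, hA, hd, rfl⟩
      rw [(Asg_nil_iff m u t).mp hA |>.1, (Asg_nil_iff m u t).mp hA |>.2]
      rw [Finset.union_empty, add_zero, ← hS p hp]
      exact hp
  | cons row rows ih =>
    intro S hS q
    rw [List.foldl_cons, ih (stepB m S row) (InvB_stepB hS) q]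
    constructor
    · rintro ⟨p', hp', u, t, hA, hd, rfl⟩
      rcases (mem_stepB m S row p').mp hp' with hp'S | ⟨p, hp, i, h0, hm, hni, rfl⟩
      · exact ⟨p', hp'S, u, t, Asg.skip hA, hd, rfl⟩
      · -- p' = (sorted (p.1 ++ [i]), p.2 + entry); fold its pick of i into the assignment
        have hp1 := hS p hp
        have hniF : i ∉ p.1.toFinset := by simpa [List.mem_toFinset] using hni
        have hfin : (PySem.List.sorted (p.1 ++ [i]) (fun x => x) false).toFinset
            = insert i p.1.toFinset := (toFinset_sorted_append hp1 hniF).1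
        rw [hfin] at hd
        have hiu : i ∉ u := Finset.disjoint_left.mp hd.symm (Finset.mem_insert_self i _)
        refine ⟨p, hp, insert i u, pvEntry row i + t,
          Asg.pick i h0 hm hiu hA, ?_, ?_⟩
        · rw [Finset.disjoint_insert_left]
          exact ⟨hniF, Finset.disjoint_of_subset_right (Finset.subset_insert i _) hd⟩
        · rw [hfin]
          have e1 : insert i p.1.toFinset ∪ u = p.1.toFinset ∪ insert i u := by
            rw [Finset.insert_union, Finset.union_insert]
          have e2 : p.2 + pvEntry row i + t = p.2 + (pvEntry row i + t) := by ring
          rw [e1, e2]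
    · rintro ⟨p, hp, u, t, hA, hd, rfl⟩
      rcases (Asg_cons_iff m row rows u t).mp hA with hA' | ⟨i, u', t', h0, hm, hniu', hA', rfl, rfl⟩
      · exact ⟨p, (mem_stepB m S row p).mpr (Or.inl hp), u, t, hA', hd, rfl⟩
      · have hiu : i ∈ insert i u' := Finset.mem_insert_self i u'
        have hniF : i ∉ p.1.toFinset := Finset.disjoint_left.mp hd hiu
        have hni : i ∉ p.1 := by simpa [List.mem_toFinset] using hniF
        have hfin : (PySem.List.sorted (p.1 ++ [i]) (fun x => x) false).toFinset
            = insert i p.1.toFinset := (toFinset_sorted_append (hS p hp) hniF).1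
        have hdu' : Disjoint u' p.1.toFinset :=
          Finset.disjoint_of_subset_left (Finset.subset_insert i u') hd
        refine ⟨(PySem.List.sorted (p.1 ++ [i]) (fun x => x) false, p.2 + pvEntry row i),
          (mem_stepB m S row _).mpr (Or.inr ⟨p, hp, i, h0, hm, hni, rfl⟩), u', t', hA', ?_, ?_⟩
        · show Disjoint u' (PySem.List.sorted (p.1 ++ [i]) (fun x => x) false).toFinset
          rw [hfin, Finset.disjoint_insert_right]
          exact ⟨hniu', hdu'⟩
        · show _ = (sortF ((PySem.List.sorted (p.1 ++ [i]) (fun x => x) false).toFinset ∪ u'),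
            p.2 + pvEntry row i + t')
          rw [hfin]
          have e1 : insert i p.1.toFinset ∪ u' = p.1.toFinset ∪ insert i u' := by
            rw [Finset.insert_union, Finset.union_insert]
          have e2 : p.2 + pvEntry row i + t' = p.2 + (pvEntry row i + t') := by ring
          rw [e1, e2]

-- B's result characterised through Asg
lemma alt_iff (matrix : List (List Int)) (t : Int) (ht : ¬ t < 0) :
    (search_subset_alt matrix t = true ↔
      ∃ u, Asg (matrix.headD []).length matrix u t ∧ u ≠ ∅) := by
  unfold search_subset_alt
  rw [if_neg ht]
  have hInv : InvB [(([] : List Int), (0 : Int))] := by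
    intro p hp
    rcases List.mem_singleton.mp hp with rfl
    simp [sortF]
  rw [List.any_eq_true]
  constructor
  · rintro ⟨q, hq, hpred⟩
    rcases (mem_foldl_stepB _ matrix _ hInv q).mp hq with ⟨p, hp, u, s, hA, -, rfl⟩
    rcases List.mem_singleton.mp hp with rfl
    simp only [List.toFinset_nil, Finset.empty_union, Bool.and_eq_true, decide_eq_true_eq,
      Bool.not_eq_true', List.isEmpty_eq_false_iff] at hpred ⊢
    obtain ⟨hs, hne⟩ := hpred
    refine ⟨u, ?_, ?_⟩
    · rwa [show s = t by omega] at hA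
    · intro hu; rw [hu] at hne; simp [sortF] at hne
  · rintro ⟨u, hA, hu⟩
    refine ⟨(sortF u, t), ?_, ?_⟩
    · apply (mem_foldl_stepB _ matrix _ hInv _).mpr
      refine ⟨(([] : List Int), (0 : Int)), List.mem_singleton.mpr rfl, u, t, hA, ?_, ?_⟩
      · simp
      · simp
    · simp only [Bool.and_eq_true, decide_eq_true_eq, Bool.not_eq_true',
        List.isEmpty_eq_false_iff]
      exact ⟨by simp, fun hc => hu ((sortF_eq_nil u).mp hc)⟩

-- ---------- A side ----------

def rowsA (matrix : List (List Int)) : List (List Int) :=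
  matrix.getLastD [] :: matrix.dropLast

lemma length_rowsA {matrix : List (List Int)} (h : matrix ≠ []) :
    (rowsA matrix).length = matrix.length := by
  have : matrix.length ≠ 0 := fun hc => h (List.length_eq_zero_iff.mp hc)
  simp [rowsA, List.length_dropLast]
  omega

lemma pvRow_eq {matrix : List (List Int)} (h : matrix ≠ []) (j : Nat)
    (hj : j < matrix.length) :
    pvRow matrix ((j : Int) - 1) = (rowsA matrix)[j]'(by rw [length_rowsA h]; exact hj) := by
  cases j with
  | zero =>
    show pvRow matrix (-1) = matrix.getLastD []
    unfold pvRow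
    rw [PySem.List.pyGet?_neg_one, List.getLastD_eq_getLast?]
  | succ j =>
    have hjn : j < matrix.length - 1 := by omega
    have e : ((j + 1 : Nat) : Int) - 1 = (j : Int) := by push_cast; ring
    unfold pvRow
    rw [e, PySem.List.pyGet?_natCast]
    have hget : matrix[j]? = some (matrix[j]'(by omega)) := List.getElem?_eq_getElem (by omega)
    rw [hget]
    show matrix[j]'(by omega) = (rowsA matrix)[j + 1]'_
    have : (rowsA matrix)[j + 1]'(by rw [length_rowsA h]; omega)
        = (matrix.dropLast)[j]'(by rw [List.length_dropLast]; omega) := rfl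
    rw [this, List.getElem_dropLast]

lemma nodup_bounded_length_le {m : Nat} (R : List Int) (hn : R.Nodup)
    (hb : ∀ i ∈ R, 0 ≤ i ∧ i < (m : Int)) : R.length ≤ m := by
  have h1 : R.toFinset.card = R.length := List.toFinset_card_of_nodup hn
  have h2 : R.toFinset ⊆ (Finset.range m).image (fun n : Nat => (n : Int)) := by
    intro x hx
    rcases hb x (List.mem_toFinset.mp hx) with ⟨h0, hm⟩
    refine Finset.mem_image.mpr ⟨x.toNat, Finset.mem_range.mpr (by omega), Int.toNat_of_nonneg h0⟩
  have h3 : ((Finset.range m).image (fun n : Nat => (n : Int))).card = m := by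
    rw [Finset.card_image_of_injective _ (fun a b hab => by exact_mod_cast hab),
      Finset.card_range]
  have := Finset.card_le_card h2
  omega

lemma diff_length_lt {m : Nat} (R : List Int) (i : Int) (hn : R.Nodup)
    (hb : ∀ x ∈ R, 0 ≤ x ∧ x < (m : Int)) (hi : i ∈ R) :
    (PySem.Set.diff R [i]).length < m := by
  have hn' : (PySem.Set.diff R [i]).Nodup := PySem.Set.nodup_diff R [i] hn
  have hmem : ∀ x, x ∈ PySem.Set.diff R [i] ↔ x ∈ R ∧ x ≠ i := by
    intro x; rw [PySem.Set.mem_diff]; simp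
  have h1 : (PySem.Set.diff R [i]).toFinset.card = (PySem.Set.diff R [i]).length :=
    List.toFinset_card_of_nodup hn'
  have h2 : (PySem.Set.diff R [i]).toFinset ⊆ R.toFinset.erase i := by
    intro x hx
    rcases (hmem x).mp (List.mem_toFinset.mp hx) with ⟨hxR, hxi⟩
    exact Finset.mem_erase.mpr ⟨hxi, List.mem_toFinset.mpr hxR⟩
  have h3 : (R.toFinset.erase i).card = R.toFinset.card - 1 :=
    Finset.card_erase_of_mem (List.mem_toFinset.mpr hi)
  have h4 : R.toFinset.card = R.length := List.toFinset_card_of_nodup hn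
  have h5 : R.length ≤ m := nodup_bounded_length_le R hn hb
  have h6 : 1 ≤ R.length := List.length_pos_of_mem hi
  have := Finset.card_le_card h2
  omega

lemma recurA_iff (matrix : List (List Int)) (target : Int) (m : Nat) (hne : matrix ≠ []) :
    ∀ (fuel j : Nat) (s : Int) (R : List Int), j ≤ matrix.length →
      matrix.length - j ≤ fuel → R.Nodup → (∀ i ∈ R, 0 ≤ i ∧ i < (m : Int)) →
      (recurA matrix target m fuel ((j : Int) - 1) s R = true ↔
        ∃ u t, Asg m ((rowsA matrix).drop j) u t ∧ (∀ i ∈ u, i ∈ R) ∧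
          s + t = target ∧ (u ≠ ∅ ∨ R.length ≠ m)) := by
  have base : ∀ (fuel : Nat) (s : Int) (R : List Int),
      (recurA matrix target m fuel ((matrix.length : Int) - 1) s R = true ↔
        ∃ u t, Asg m ((rowsA matrix).drop matrix.length) u t ∧ (∀ i ∈ u, i ∈ R) ∧
          s + t = target ∧ (u ≠ ∅ ∨ R.length ≠ m)) := by
    intro fuel s R
    have hdrop : (rowsA matrix).drop matrix.length = [] :=
      List.drop_eq_nil_of_le (le_of_eq (length_rowsA hne))
    rw [recurA.eq_def, if_pos rfl, hdrop]
    constructor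
    · intro h
      simp only [Bool.and_eq_true, decide_eq_true_eq, Bool.not_eq_true',
        decide_eq_false_iff_not] at h
      exact ⟨∅, 0, Asg.nil, by simp, by rw [add_zero]; exact h.1, Or.inr h.2⟩
    · rintro ⟨u, t, hA, hsub, hsum, hcond⟩
      obtain ⟨rfl, rfl⟩ := (Asg_nil_iff m u t).mp hA
      simp only [Bool.and_eq_true, decide_eq_true_eq, Bool.not_eq_true',
        decide_eq_false_iff_not]
      refine ⟨by rw [add_zero] at hsum; exact hsum, ?_⟩
      rcases hcond with h | h
      · exact absurd rfl h
      · exact h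
  intro fuel
  induction fuel with
  | zero =>
    intro j s R hj hfuel hn hb
    have hjn : j = matrix.length := by omega
    subst hjn
    exact base 0 s R
  | succ f ih =>
    intro j s R hj hfuel hn hb
    by_cases hjn : j = matrix.length
    · subst hjn; exact base (f + 1) s R
    · have hjlt : j < matrix.length := by omega
      have hjr : j < (rowsA matrix).length := by rw [length_rowsA hne]; exact hjlt
      have hdrop : (rowsA matrix).drop j
          = (rowsA matrix)[j] :: (rowsA matrix).drop (j + 1) := List.drop_eq_getElem_cons hjr
      have hrow : pvRow matrix ((j : Int) - 1) = (rowsA matrix)[j] := pvRow_eq hne j hjlt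
      have hcond : ¬ ((j : Int) - 1 = (matrix.length : Int) - 1) := by
        intro hc
        have : j = matrix.length := by exact_mod_cast (by omega : (j : Int) = matrix.length)
        omega
      have ecast : ((j : Int) - 1) + 1 = ((j + 1 : Nat) : Int) - 1 := by push_cast; ring
      rw [recurA.eq_def, if_neg hcond]
      show ((recurA matrix target m f (((j : Int) - 1) + 1) s R ::
        R.map fun i => recurA matrix target m f (((j : Int) - 1) + 1)
          (s + pvEntry (pvRow matrix ((j : Int) - 1)) i)
          (PySem.Set.diff R [i])).any id = true) ↔ _
      simp only [hrow, ecast, List.any_cons, List.any_map, Function.comp, id_eq,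
        Bool.or_eq_true, List.any_eq_true]
      have IHskip := ih (j + 1) s R (by omega) (by omega) hn hb
      have hnR : ∀ i ∈ R, (PySem.Set.diff R [i]).Nodup := fun i _ =>
        PySem.Set.nodup_diff R [i] hn
      have hbR : ∀ i ∈ R, ∀ x ∈ PySem.Set.diff R [i], 0 ≤ x ∧ x < (m : Int) := by
        intro i _ x hx
        exact hb x ((PySem.Set.mem_diff _ _ _).mp hx).1
      have IHpick : ∀ i ∈ R,
          (recurA matrix target m f (((j + 1 : Nat) : Int) - 1)
            (s + pvEntry ((rowsA matrix)[j]'hjr) i) (PySem.Set.diff R [i]) = true ↔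
          ∃ u t, Asg m ((rowsA matrix).drop (j + 1)) u t ∧
            (∀ x ∈ u, x ∈ PySem.Set.diff R [i]) ∧
            (s + pvEntry ((rowsA matrix)[j]'hjr) i) + t = target ∧
            (u ≠ ∅ ∨ (PySem.Set.diff R [i]).length ≠ m)) := fun i hi =>
        ih (j + 1) _ _ (by omega) (by omega) (hnR i hi) (hbR i hi)
      rw [hdrop]
      constructor
      · rintro (h | ⟨i, hi, h⟩)
        · obtain ⟨u, t, hA, hsub, hsum, hc⟩ := IHskip.mp h
          exact ⟨u, t, Asg.skip hA, hsub, hsum, hc⟩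
        · obtain ⟨u, t, hA, hsub, hsum, -⟩ := (IHpick i hi).mp h
          have hbi := hb i hi
          have hiu : i ∉ u := by
            intro hc
            exact ((PySem.Set.mem_diff _ _ _).mp (hsub i hc)).2 (List.mem_singleton.mpr rfl)
          refine ⟨insert i u, pvEntry ((rowsA matrix)[j]'hjr) i + t,
            Asg.pick i hbi.1 hbi.2 hiu hA, ?_, by rw [← hsum]; ring, Or.inl (by simp)⟩
          intro x hx
          rcases Finset.mem_insert.mp hx with rfl | hx
          · exact hi
          · exact ((PySem.Set.mem_diff _ _ _).mp (hsub x hx)).1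
      · rintro ⟨u, t, hA, hsub, hsum, hc⟩
        rcases (Asg_cons_iff m _ _ u t).mp hA with hA' | ⟨i, u', t', h0, hm, hniu', hA', rfl, rfl⟩
        · exact Or.inl (IHskip.mpr ⟨u, t, hA', hsub, hsum, hc⟩)
        · have hiR : i ∈ R := hsub i (Finset.mem_insert_self i u')
          refine Or.inr ⟨i, hiR, (IHpick i hiR).mpr ⟨u', t', hA', ?_, by rw [← hsum]; ring, ?_⟩⟩
          · intro x hx
            refine (PySem.Set.mem_diff _ _ _).mpr ⟨hsub x (Finset.mem_insert_of_mem hx), ?_⟩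
            intro hxi
            rw [List.mem_singleton.mp hxi] at hx
            exact hniu' hx
          · exact Or.inr (Nat.ne_of_lt (diff_length_lt R i hn hb hiR))

lemma rowsA_perm {matrix : List (List Int)} (h : matrix ≠ []) :
    (rowsA matrix).Perm matrix := by
  have hlast : matrix.getLastD [] = matrix.getLast h := by
    rw [List.getLastD_eq_getLast?, List.getLast?_eq_some_getLast h]
    rfl
  conv_rhs => rw [← List.dropLast_append_getLast h]
  rw [rowsA, hlast]
  exact (List.perm_append_singleton _ _).symm

lemma mem_pvCols (m : Nat) (i : Int) : i ∈ pvCols m ↔ 0 ≤ i ∧ i < (m : Int) := by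
  unfold pvCols
  rw [List.mem_map]
  constructor
  · rintro ⟨n, hn, rfl⟩
    have := List.mem_range.mp hn
    omega
  · rintro ⟨h0, hm⟩
    exact ⟨i.toNat, List.mem_range.mpr (by omega), Int.toNat_of_nonneg h0⟩

-- A's result characterised through Asg
lemma a_iff (matrix : List (List Int)) (t : Int) (ht : ¬ t < 0) (hne : matrix ≠ []) :
    (search_subset matrix t = true ↔
      ∃ u, Asg (matrix.headD []).length (rowsA matrix) u t ∧ u ≠ ∅) := by
  unfold search_subset
  rw [if_neg ht]
  have hinj : Function.Injective (fun n : Nat => (n : Int)) := fun a b hab => by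
    have : (a : Int) = (b : Int) := hab
    exact_mod_cast this
  have hnodup : (pvCols (matrix.headD []).length).Nodup :=
    List.Nodup.map hinj List.nodup_range
  have hb : ∀ i ∈ pvCols (matrix.headD []).length,
      0 ≤ i ∧ i < ((matrix.headD []).length : Int) := fun i hi => (mem_pvCols _ i).mp hi
  have hlen : (pvCols (matrix.headD []).length).length = (matrix.headD []).length := by
    simp [pvCols]
  have e : (-1 : Int) = ((0 : Nat) : Int) - 1 := by norm_num
  rw [e, recurA_iff matrix t (matrix.headD []).length hne matrix.length 0 0
    (pvCols (matrix.headD []).length) (by omega) (by omega) hnodup hb, List.drop_zero]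
  constructor
  · rintro ⟨u, t', hA, hsub, hsum, hc⟩
    have ht' : t' = t := by omega
    subst ht'
    refine ⟨u, hA, ?_⟩
    rcases hc with h | h
    · exact h
    · exact absurd hlen h
  · rintro ⟨u, hA, hu⟩
    refine ⟨u, t, hA, ?_, by ring, Or.inl hu⟩
    intro i hi
    exact (mem_pvCols _ i).mpr (Asg_bounds hA i hi)

-- ===== VERDICT (by name: the statement is the Claim_ definition above) =====
theorem search_subset_spec : Claim_equal_search_subset := by
  unfold Claim_equal_search_subset Spec_search_subset
  intro matrix t _ hPre
  by_cases ht : t < 0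
  · show search_subset matrix t = search_subset_alt matrix t
    unfold search_subset search_subset_alt
    rw [if_pos ht, if_pos ht]
  · have hne : matrix ≠ [] := by
      rcases hPre with h | ⟨h, -⟩
      · exact absurd h ht
      · exact h
    show search_subset matrix t = search_subset_alt matrix t
    apply Bool.eq_iff_iff.mpr
    rw [a_iff matrix t ht hne, alt_iff matrix t ht]
    constructor
    · rintro ⟨u, hA, hu⟩
      exact ⟨u, Asg_perm (rowsA_perm hne) hA, hu⟩
    · rintro ⟨u, hA, hu⟩
      exact ⟨u, Asg_perm (rowsA_perm hne).symm hA, hu⟩
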